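-- pv_equiv track=rewrite | github.com/pianonerd7/LegalSearchEngine | search.py | get_positional_intersect
-- ===== SOURCE A (Python) =====
-- def get_positional_intersect(postings1, postings2, pos_diff):
--     answer = dict()
--     #postings1
--     i = 0
--     #postings2
--     j = 0
--
--     while i < len(postings1) and j < len(postings2):
--         if postings1[i][0] == postings2[j][0]:
--
--             lst = []
--             positions1 = postings1[i][1]
--             positions2 = postings2[j][1]
--             pp1 = 0
--             pp2 = 0
--
--             while pp1 < len(positions1):
--                 while pp2 < len(positions2):
--                     if abs(positions1[pp1] - positions2[pp2]) <= pos_diff: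
--                         lst.append(positions2[pp2])
--                     elif positions2[pp2] > positions1[pp1]:
--                         break
--                     pp2 += 1
--
--                 for element in lst:
--                     if abs(element - positions1[pp1]) <= pos_diff:
--                         doc_ID = postings1[i][0]
--                         if doc_ID not in answer:
--                             answer[doc_ID] = []
--                         answer[doc_ID].append(positions1[pp1])
--
--                 pp1 += 1
--             i += 1
--             j += 1
--         elif postings1[i][0] < postings2[j][0]:
--             i += 1
--         else:
--             j += 1
--     return answer
-- ===== SOURCE B (Python) =====
-- from bisect import insort, bisect_left, bisect_right
--
--
-- def _matched_pairs(postings1, postings2):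
--     # stage 1: the doc-id merge, producing matched (doc, positions1, positions2)
--     pairs = []
--     i = 0
--     j = 0
--     while i < len(postings1) and j < len(postings2):
--         d1 = postings1[i][0]
--         d2 = postings2[j][0]
--         if d1 == d2:
--             pairs.append((d1, postings1[i][1], postings2[j][1]))
--             i += 1
--             j += 1
--         elif d1 < d2:
--             i += 1
--         else:
--             j += 1
--     return pairs
--
--
-- def _doc_hits(positions1, positions2, pos_diff):
--     # stage 2: per doc, admit positions2 entries into a SORTED window (insort) and
--     # count each p1's matches with two binary searches instead of rescanning a list
--     window = []
--     k = 0
--     hits = []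
--     for p1 in positions1:
--         while k < len(positions2) and not (positions2[k] > p1 and abs(p1 - positions2[k]) > pos_diff):
--             if abs(p1 - positions2[k]) <= pos_diff:
--                 insort(window, positions2[k])
--             k += 1
--         n = bisect_right(window, p1 + pos_diff) - bisect_left(window, p1 - pos_diff)
--         hits.extend([p1] * n)
--     return hits
--
--
-- def get_positional_intersect(postings1, postings2, pos_diff):
--     # stage 3: fold the per-doc hit lists into the answer dict
--     answer = {}
--     for doc, pos1, pos2 in _matched_pairs(postings1, postings2):
--         hits = _doc_hits(pos1, pos2, pos_diff)
--         if hits: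
--             answer.setdefault(doc, []).extend(hits)
--     return answer
-- ===== Notes on version B (the rewrite author's own statement) =====
-- stated objective: faster
-- what changed: A interleaves everything in one stateful nest and rescans the whole accumulated match list for every position of positions1; B is staged (merge matched doc pairs, then per doc keep the admitted positions2 entries as a sorted window via insort and count each position's matches with two binary searches, then fold the per-doc hit lists into the dict).
import Mathlib
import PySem

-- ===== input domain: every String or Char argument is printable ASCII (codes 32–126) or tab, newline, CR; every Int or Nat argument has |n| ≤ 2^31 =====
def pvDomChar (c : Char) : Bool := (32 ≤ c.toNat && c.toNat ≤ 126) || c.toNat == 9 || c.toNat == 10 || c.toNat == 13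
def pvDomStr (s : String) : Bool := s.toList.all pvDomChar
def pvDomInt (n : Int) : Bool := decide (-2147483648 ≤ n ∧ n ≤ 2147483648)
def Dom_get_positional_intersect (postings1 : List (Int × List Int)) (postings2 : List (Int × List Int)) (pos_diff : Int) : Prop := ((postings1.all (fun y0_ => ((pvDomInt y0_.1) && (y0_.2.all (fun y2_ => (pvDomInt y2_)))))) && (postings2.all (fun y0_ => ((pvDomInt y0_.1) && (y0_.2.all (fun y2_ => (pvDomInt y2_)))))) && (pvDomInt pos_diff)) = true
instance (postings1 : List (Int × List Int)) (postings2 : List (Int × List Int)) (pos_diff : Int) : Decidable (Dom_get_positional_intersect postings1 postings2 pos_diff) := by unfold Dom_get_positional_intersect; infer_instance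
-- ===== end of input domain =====

-- B stages the work (doc-id merge pass, then per-doc hit lists counted with a sorted
-- window + binary searches, then one fold into the dict) instead of A's single
-- stateful nest that rescans the accumulated match list for every position.

-- ===== PORT A =====
-- the inner `while pp2` loop: advance through positions2, appending matches to lst
def pvAdvA (d p1 : Int) : List Int → List Int → List Int × List Int
  | [], lst => ([], lst)
  | p2 :: r, lst =>
    if |p1 - p2| ≤ d then pvAdvA d p1 r (lst ++ [p2])
    else if p2 > p1 then (p2 :: r, lst)
    else pvAdvA d p1 r lst

-- `if doc_ID not in answer: answer[doc_ID] = []`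
def pvEnsure (ans : PySem.Dict Int (List Int)) (doc : Int) : PySem.Dict Int (List Int) :=
  if ans.contains doc then ans else ans.insert doc []

-- the `while pp1` loop: per position p1, advance pp2/lst, then the `for element in lst` scan
def pvInnerA (d doc : Int) : List Int → List Int → List Int → PySem.Dict Int (List Int) → PySem.Dict Int (List Int)
  | [], _, _, ans => ans
  | p1 :: rest, pos2, lst, ans =>
    let s := pvAdvA d p1 pos2 lst
    let ans' := s.2.foldl (fun a e => if |e - p1| ≤ d then (pvEnsure a doc).modify doc [] (· ++ [p1]) else a) ans
    pvInnerA d doc rest s.1 s.2 ans'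

-- the outer `while i ... and j ...` merge over the two postings lists
def pvOuterA (d : Int) : List (Int × List Int) → List (Int × List Int) → PySem.Dict Int (List Int) → PySem.Dict Int (List Int)
  | [], _, ans => ans
  | _ :: _, [], ans => ans
  | x :: xs, y :: ys, ans =>
    if x.1 = y.1 then pvOuterA d xs ys (pvInnerA d x.1 x.2 y.2 [] ans)
    else if x.1 < y.1 then pvOuterA d xs (y :: ys) ans
    else pvOuterA d (x :: xs) ys ans
termination_by p q _ => p.length + q.length
decreasing_by all_goals (simp only [List.length_cons]; omega)

def get_positional_intersect (postings1 : List (Int × List Int)) (postings2 : List (Int × List Int)) (pos_diff : Int) : List (Int × List Int) :=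
  (pvOuterA pos_diff postings1 postings2 PySem.Dict.empty).items

-- ===== PORT B =====
-- _matched_pairs: the doc-id merge, producing the matched (doc, positions1, positions2)
def pvMatchedPairs : List (Int × List Int) → List (Int × List Int) → List (Int × List Int × List Int)
  | [], _ => []
  | _ :: _, [] => []
  | x :: xs, y :: ys =>
    if x.1 = y.1 then (x.1, x.2, y.2) :: pvMatchedPairs xs ys
    else if x.1 < y.1 then pvMatchedPairs xs (y :: ys)
    else pvMatchedPairs (x :: xs) ys
termination_by p q => p.length + q.length
decreasing_by all_goals (simp only [List.length_cons]; omega)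

-- the `while k < len(positions2) and not (...)` admission loop (insort keeps window sorted)
def pvTake (d p1 : Int) : List Int → List Int → List Int × List Int
  | [], window => ([], window)
  | p2 :: r, window =>
    if p2 > p1 ∧ |p1 - p2| > d then (p2 :: r, window)
    else pvTake d p1 r (if |p1 - p2| ≤ d then PySem.List.insertBy (fun a b => decide (a < b)) p2 window else window)

-- _doc_hits: the `for p1 in positions1` loop over state (remaining positions2, window, hits)
def pvDocHits (pos1 pos2 : List Int) (d : Int) : List Int :=
  (pos1.foldl (fun st p1 =>
      let s := pvTake d p1 st.1 st.2.1
      let n := PySem.List.bisectRight s.2 (p1 + d) - PySem.List.bisectLeft s.2 (p1 - d)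
      (s.1, s.2, st.2.2 ++ List.replicate n p1))
    (pos2, ([] : List Int), ([] : List Int))).2.2

def get_positional_intersect_alt (postings1 : List (Int × List Int)) (postings2 : List (Int × List Int)) (pos_diff : Int) : List (Int × List Int) :=
  ((pvMatchedPairs postings1 postings2).foldl (fun answer t =>
      let hits := pvDocHits t.2.1 t.2.2 pos_diff
      if hits = [] then answer else (answer.setdefault t.1 []).modify t.1 [] (· ++ hits))
    PySem.Dict.empty).items

-- ===== PRECONDITION & SPEC =====
def Spec_get_positional_intersect (postings1 : List (Int × List Int)) (postings2 : List (Int × List Int)) (pos_diff : Int) (out : List (Int × List Int)) : Prop := out = get_positional_intersect_alt postings1 postings2 pos_diff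
instance (postings1 : List (Int × List Int)) (postings2 : List (Int × List Int)) (pos_diff : Int) (out : List (Int × List Int)) : Decidable (Spec_get_positional_intersect postings1 postings2 pos_diff out) := by unfold Spec_get_positional_intersect; infer_instance

-- ===== CLAIM (what is proved, stated in full; the proofs are below) =====
def Claim_equal_get_positional_intersect : Prop := ∀ (postings1 : List (Int × List Int)) (postings2 : List (Int × List Int)) (pos_diff : Int), Dom_get_positional_intersect postings1 postings2 pos_diff → Spec_get_positional_intersect postings1 postings2 pos_diff (get_positional_intersect postings1 postings2 pos_diff)

-- ===== LEMMAS AND PROOFS =====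

-- proof-side abbreviation: the net effect on the answer dict of one doc's hit list
def pvApp (ans : PySem.Dict Int (List Int)) (doc : Int) (h : List Int) : PySem.Dict Int (List Int) :=
  if h = [] then ans else ans.modify doc [] (· ++ h)

-- proof-side recursive form of B's per-doc loop (the foldl in pvDocHits unrolls to it)
def pvHitsRec (d : Int) : List Int → List Int → List Int → List Int
  | [], _, _ => []
  | p1 :: rest, pos2, w =>
    let s := pvTake d p1 pos2 w
    List.replicate (PySem.List.bisectRight s.2 (p1 + d) - PySem.List.bisectLeft s.2 (p1 - d)) p1
      ++ pvHitsRec d rest s.1 s.2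

-- A's `if doc not in answer: answer[doc] = []` followed by the append is one modify
theorem pvEnsure_modify (a : PySem.Dict Int (List Int)) (doc : Int) (h : List Int) :
    (pvEnsure a doc).modify doc [] (· ++ h) = a.modify doc [] (· ++ h) := by
  unfold pvEnsure PySem.Dict.modify
  by_cases hc : a.contains doc
  · simp [hc]
  · have hc' : a.contains doc = false := by simpa using hc
    simp only [hc', Bool.false_eq_true, if_false]
    rw [PySem.Dict.getD_insert_self, PySem.Dict.insert_insert_self,
      PySem.Dict.getD_of_not_contains a _ hc']

theorem pvModify_modify (d : PySem.Dict Int (List Int)) (k : Int) (h1 h2 : List Int) :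
    (d.modify k [] (· ++ h1)).modify k [] (· ++ h2) = d.modify k [] (· ++ (h1 ++ h2)) := by
  unfold PySem.Dict.modify
  simp only [PySem.Dict.getD_insert_self, PySem.Dict.insert_insert_self, List.append_assoc]

theorem pvApp_append (ans : PySem.Dict Int (List Int)) (doc : Int) (h1 h2 : List Int) :
    pvApp (pvApp ans doc h1) doc h2 = pvApp ans doc (h1 ++ h2) := by
  unfold pvApp
  by_cases e1 : h1 = [] <;> by_cases e2 : h2 = [] <;>
    simp [e1, e2, pvModify_modify]

-- B's `answer.setdefault(doc, []).extend(hits)` is the same modify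
theorem pvSetdefault_modify (d : PySem.Dict Int (List Int)) (k : Int) (h : List Int) :
    (d.setdefault k []).modify k [] (· ++ h) = d.modify k [] (· ++ h) := by
  by_cases hc : d.contains k
  · rw [PySem.Dict.setdefault_of_contains d _ hc]
  · have hc' : d.contains k = false := by simpa using hc
    rw [PySem.Dict.setdefault_of_not_contains d _ hc']
    unfold PySem.Dict.modify
    rw [PySem.Dict.getD_insert_self, PySem.Dict.insert_insert_self,
      PySem.Dict.getD_of_not_contains d _ hc']

-- bisect.insort keeps the window a sorted permutation of A's appended lst
theorem pvInsort_perm (x : Int) (w : List Int) :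
    (PySem.List.insertBy (fun a b => decide (a < b)) x w).Perm (w ++ [x]) := by
  induction w with
  | nil => simp [PySem.List.insertBy]
  | cons y ys ih =>
    by_cases hlt : x < y
    · simp only [PySem.List.insertBy, hlt, decide_true, if_true]
      exact List.Perm.symm (List.perm_append_comm.trans (by simp))
    · simp only [PySem.List.insertBy, hlt, decide_false, List.cons_append]
      simp only [Bool.false_eq_true, if_false]
      exact ih.cons y

theorem pvInsort_sorted (x : Int) (w : List Int) (hs : w.Pairwise (· ≤ ·)) :
    (PySem.List.insertBy (fun a b => decide (a < b)) x w).Pairwise (· ≤ ·) := by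
  induction w with
  | nil => simp [PySem.List.insertBy]
  | cons y ys ih =>
    rcases List.pairwise_cons.mp hs with ⟨hy, hys⟩
    by_cases hlt : x < y
    · simp only [PySem.List.insertBy, hlt, decide_true, if_true]
      refine List.pairwise_cons.mpr ⟨?_, hs⟩
      intro z hz
      rcases List.mem_cons.mp hz with rfl | hz
      · exact le_of_lt hlt
      · exact le_trans (le_of_lt hlt) (hy z hz)
    · simp only [PySem.List.insertBy, hlt, decide_false, Bool.false_eq_true, if_false]
      refine List.pairwise_cons.mpr ⟨?_, ih hys⟩
      intro z hz
      rcases (PySem.List.mem_insertBy _ x z ys).mp hz with rfl | hz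
      · omega
      · exact hy z hz

-- on a sorted list, bisect_left counts the elements < x
theorem pvBisectLeft_count (w : List Int) (x : Int) (hs : w.Pairwise (· ≤ ·)) :
    PySem.List.bisectLeft w x = w.countP (fun e => decide (e < x)) := by
  obtain ⟨hL, hlt, hge⟩ := PySem.List.bisectLeft_spec w x hs
  set L := PySem.List.bisectLeft w x with hLdef
  have htake : (w.take L).countP (fun e => decide (e < x)) = (w.take L).length := by
    refine List.countP_eq_length.mpr ?_
    intro e he
    obtain ⟨i, hi, rfl⟩ := List.mem_iff_getElem.mp he
    have hiL : i < L := by simp only [List.length_take] at hi; omega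
    have hiw : i < w.length := by simp only [List.length_take] at hi; omega
    simp only [List.getElem_take, decide_eq_true_eq]
    exact hlt i hiw hiL
  have hdrop : (w.drop L).countP (fun e => decide (e < x)) = 0 := by
    refine List.countP_eq_zero.mpr ?_
    intro e he
    obtain ⟨i, hi, rfl⟩ := List.mem_iff_getElem.mp he
    have hlen : i < w.length - L := by simpa using hi
    have hx := hge (L + i) (by omega) (by omega)
    simp only [List.getElem_drop, decide_eq_true_eq]
    exact not_lt.mpr hx
  have hcat := congrArg (List.countP (fun e => decide (e < x))) (List.take_append_drop L w)
  rw [List.countP_append, htake, hdrop, List.length_take] at hcat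
  omega

-- on a sorted list, bisect_right counts the elements <= x
theorem pvBisectRight_count (w : List Int) (x : Int) (hs : w.Pairwise (· ≤ ·)) :
    PySem.List.bisectRight w x = w.countP (fun e => decide (e ≤ x)) := by
  obtain ⟨hL, hle, hgt⟩ := PySem.List.bisectRight_spec w x hs
  set L := PySem.List.bisectRight w x with hLdef
  have htake : (w.take L).countP (fun e => decide (e ≤ x)) = (w.take L).length := by
    refine List.countP_eq_length.mpr ?_
    intro e he
    obtain ⟨i, hi, rfl⟩ := List.mem_iff_getElem.mp he
    have hiL : i < L := by simp only [List.length_take] at hi; omega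
    have hiw : i < w.length := by simp only [List.length_take] at hi; omega
    simp only [List.getElem_take, decide_eq_true_eq]
    exact hle i hiw hiL
  have hdrop : (w.drop L).countP (fun e => decide (e ≤ x)) = 0 := by
    refine List.countP_eq_zero.mpr ?_
    intro e he
    obtain ⟨i, hi, rfl⟩ := List.mem_iff_getElem.mp he
    have hlen : i < w.length - L := by simpa using hi
    have hx := hgt (L + i) (by omega) (by omega)
    simp only [List.getElem_drop, decide_eq_true_eq]
    exact not_le.mpr hx
  have hcat := congrArg (List.countP (fun e => decide (e ≤ x))) (List.take_append_drop L w)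
  rw [List.countP_append, htake, hdrop, List.length_take] at hcat
  omega

-- window count: countP(<=b) - countP(<a) = countP(a<=.<=b), on any list
theorem pvCount_range (w : List Int) (a b : Int) :
    w.countP (fun e => decide (e ≤ b)) - w.countP (fun e => decide (e < a))
      = w.countP (fun e => decide (a ≤ e) && decide (e ≤ b)) := by
  have hmono : a ≤ b → ∀ (u : List Int),
      u.countP (fun e => decide (e ≤ b)) = u.countP (fun e => decide (e < a)) + u.countP (fun e => decide (a ≤ e) && decide (e ≤ b)) := by
    intro hab u
    induction u with
    | nil => simp
    | cons f s ihs =>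
      simp only [List.countP_cons, ihs]
      by_cases h1 : f ≤ b <;> by_cases h2 : f < a <;> by_cases h3 : a ≤ f <;>
        simp [h1, h2, h3] <;> omega
  have hempty : b < a → ∀ (u : List Int),
      u.countP (fun e => decide (a ≤ e) && decide (e ≤ b)) = 0 ∧
      u.countP (fun e => decide (e ≤ b)) ≤ u.countP (fun e => decide (e < a)) := by
    intro hba u
    induction u with
    | nil => simp
    | cons f s ihs =>
      obtain ⟨hz, hle⟩ := ihs
      simp only [List.countP_cons, hz]
      by_cases h1 : f ≤ b <;> by_cases h2 : f < a <;> by_cases h3 : a ≤ f <;>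
        simp [h1, h2, h3] <;> omega
  by_cases hab : a ≤ b
  · have := hmono hab w; omega
  · have := hempty (by omega) w; omega

-- the admission loops agree: same remaining positions2; window = sorted perm of lst
theorem pvTake_eq (d p1 : Int) :
    ∀ (pos2 lst w : List Int), w.Perm lst → w.Pairwise (· ≤ ·) →
      (pvTake d p1 pos2 w).1 = (pvAdvA d p1 pos2 lst).1 ∧
      (pvTake d p1 pos2 w).2.Perm ((pvAdvA d p1 pos2 lst).2) ∧
      (pvTake d p1 pos2 w).2.Pairwise (· ≤ ·) := by
  intro pos2
  induction pos2 with
  | nil => intro lst w hp hs; exact ⟨rfl, hp, hs⟩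
  | cons p2 r ih =>
    intro lst w hp hs
    by_cases h1 : |p1 - p2| ≤ d
    · have hstop : ¬ (p2 > p1 ∧ |p1 - p2| > d) := by omega
      simp only [pvAdvA, pvTake, h1, hstop, if_true, if_false]
      exact ih (lst ++ [p2]) _
        ((pvInsort_perm p2 w).trans (List.Perm.append_right [p2] hp))
        (pvInsort_sorted p2 w hs)
    · by_cases h2 : p2 > p1
      · have hstop : p2 > p1 ∧ |p1 - p2| > d := ⟨h2, by omega⟩
        rw [show pvAdvA d p1 (p2 :: r) lst = (p2 :: r, lst) from by simp [pvAdvA, h1, h2],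
          show pvTake d p1 (p2 :: r) w = (p2 :: r, w) from by simp [pvTake, hstop]]
        exact ⟨rfl, hp, hs⟩
      · have hstop : ¬ (p2 > p1 ∧ |p1 - p2| > d) := by omega
        simp only [pvAdvA, pvTake, h1, h2, if_false]
        exact ih lst w hp hs

-- the foldl in pvDocHits unrolls to pvHitsRec with the hits accumulator appended
theorem pvFold_hits (d : Int) :
    ∀ (pos1 pos2 w out : List Int),
      (pos1.foldl (fun st p1 =>
          let s := pvTake d p1 st.1 st.2.1
          let n := PySem.List.bisectRight s.2 (p1 + d) - PySem.List.bisectLeft s.2 (p1 - d)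
          (s.1, s.2, st.2.2 ++ List.replicate n p1)) (pos2, w, out)).2.2
        = out ++ pvHitsRec d pos1 pos2 w := by
  intro pos1
  induction pos1 with
  | nil => intro pos2 w out; simp [pvHitsRec]
  | cons p1 rest ih =>
    intro pos2 w out
    simp only [List.foldl_cons, pvHitsRec]
    rw [ih]
    simp [List.append_assoc]

theorem pvDocHits_eq (d : Int) (pos1 pos2 : List Int) :
    pvDocHits pos1 pos2 d = pvHitsRec d pos1 pos2 [] := by
  unfold pvDocHits
  rw [pvFold_hits]
  simp

-- A's `for element in lst` emission pass is pvApp of replicate(count)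
theorem pvFoldA_eq (d doc p1 : Int) :
    ∀ (lst : List Int) (ans : PySem.Dict Int (List Int)),
      lst.foldl (fun a e => if |e - p1| ≤ d then (pvEnsure a doc).modify doc [] (· ++ [p1]) else a) ans
        = pvApp ans doc (List.replicate (lst.countP (fun e => decide (|e - p1| ≤ d))) p1) := by
  intro lst
  induction lst with
  | nil => intro ans; simp [pvApp]
  | cons e t ih =>
    intro ans
    simp only [List.foldl_cons, List.countP_cons]
    by_cases h1 : |e - p1| ≤ d
    · rw [if_pos h1, ih, pvEnsure_modify,
        show ans.modify doc [] (· ++ [p1]) = pvApp ans doc [p1] from by simp [pvApp],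
        pvApp_append]
      congr 1
      simp [h1, List.replicate_succ]
    · rw [if_neg h1, ih]
      congr 2
      simp [h1]

-- per matched doc: A's stateful dict updates equal pvApp of B's hit list
theorem pvInner_eq (d doc : Int) :
    ∀ (pos1 pos2 lst w : List Int) (ans : PySem.Dict Int (List Int)),
      w.Perm lst → w.Pairwise (· ≤ ·) →
      pvInnerA d doc pos1 pos2 lst ans = pvApp ans doc (pvHitsRec d pos1 pos2 w) := by
  intro pos1
  induction pos1 with
  | nil => intro pos2 lst w ans hp hs; simp [pvInnerA, pvHitsRec, pvApp]
  | cons p1 rest ih =>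
    intro pos2 lst w ans hp hs
    obtain ⟨he1, hper, hsor⟩ := pvTake_eq d p1 pos2 lst w hp hs
    simp only [pvInnerA, pvHitsRec]
    set c : Nat := PySem.List.bisectRight (pvTake d p1 pos2 w).2 (p1 + d) -
      PySem.List.bisectLeft (pvTake d p1 pos2 w).2 (p1 - d) with hc
    have hcount : c = (pvAdvA d p1 pos2 lst).2.countP (fun e => decide (|e - p1| ≤ d)) := by
      rw [hc, pvBisectRight_count _ _ hsor, pvBisectLeft_count _ _ hsor, pvCount_range,
        List.Perm.countP_eq _ hper]
      refine List.countP_congr ?_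
      intro x _
      simp only [Bool.and_eq_true, decide_eq_true_eq, abs_le]
      omega
    rw [pvFoldA_eq, ih _ _ _ _ hper hsor, ← hcount, he1, pvApp_append]

-- the outer merge of A equals the pairs-then-fold staging of B
theorem pvOuter_eq (d : Int) :
    ∀ (p q : List (Int × List Int)) (ans : PySem.Dict Int (List Int)),
      pvOuterA d p q ans
        = (pvMatchedPairs p q).foldl (fun answer t =>
            let hits := pvDocHits t.2.1 t.2.2 d
            if hits = [] then answer else (answer.setdefault t.1 []).modify t.1 [] (· ++ hits)) ans := by
  intro p q
  induction hn : p.length + q.length using Nat.strong_induction_on generalizing p q with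
  | _ n ihn =>
  match p, q with
  | [], q => intro ans; simp [pvOuterA, pvMatchedPairs]
  | x :: xs, [] => intro ans; simp [pvOuterA, pvMatchedPairs]
  | x :: xs, y :: ys =>
    intro ans
    simp only [pvOuterA, pvMatchedPairs]
    by_cases hxy : x.1 = y.1
    · rw [if_pos hxy, if_pos hxy, List.foldl_cons,
        pvInner_eq d x.1 x.2 y.2 [] [] ans (List.Perm.refl []) List.Pairwise.nil]
      have harg : pvApp ans x.1 (pvHitsRec d x.2 y.2 []) =
          (let hits := pvDocHits x.2 y.2 d
           if hits = [] then ans else (ans.setdefault x.1 []).modify x.1 [] (· ++ hits)) := by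
        simp only [pvDocHits_eq]
        unfold pvApp
        by_cases he : pvHitsRec d x.2 y.2 [] = []
        · rw [if_pos he, if_pos he]
        · rw [if_neg he, if_neg he, pvSetdefault_modify]
      rw [harg]
      exact ihn (xs.length + ys.length) (by simp only [List.length_cons] at hn; omega) xs ys rfl _
    · by_cases hlt : x.1 < y.1
      · rw [if_neg hxy, if_neg hxy, if_pos hlt, if_pos hlt]
        exact ihn (xs.length + (y :: ys).length)
          (by simp only [List.length_cons] at hn ⊢; omega) xs (y :: ys) rfl ans
      · rw [if_neg hxy, if_neg hxy, if_neg hlt, if_neg hlt]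
        exact ihn ((x :: xs).length + ys.length)
          (by simp only [List.length_cons] at hn ⊢; omega) (x :: xs) ys rfl ans

-- ===== VERDICT (by name: the statement is the Claim_ definition above) =====
theorem get_positional_intersect_spec : Claim_equal_get_positional_intersect := by
  intro p1 p2 d _
  unfold Spec_get_positional_intersect get_positional_intersect get_positional_intersect_alt
  rw [pvOuter_eq]
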